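-- pv_equiv track=rewrite | github.com/Olegas/advent-of-code-2019 | day4.py | has_double
-- ===== SOURCE A (Python) =====
-- def has_double(password):
--     prev = ''
--     group_count = 1
--     has_at_least_one = False
--     for c in str(password):
--         if c == prev:
--             group_count += 1
--         else:
--             if group_count == 2:
--                 has_at_least_one = True
--             group_count = 1
--             prev = c
--
--     if group_count == 2:
--         return True
--
--     return has_at_least_one
-- ===== SOURCE B (Python) =====
-- def has_double(password):
--     padded = [None] + list(str(password)) + [None]
--     return any(b == c and a != b and c != d
--                for a, b, c, d in zip(padded, padded[1:], padded[2:], padded[3:]))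
-- ===== Notes on version B (the rewrite author's own statement) =====
-- stated objective: alternative
-- what changed: Replaces A's prev/group_count/flag state machine with a stateless sliding-window test: pad the digit list with None sentinels and check each window of four consecutive padded characters (a,b,c,d) for b==c bounded by unequal neighbours (a!=b and c!=d), i.e. a run of exactly two.
import Mathlib
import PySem

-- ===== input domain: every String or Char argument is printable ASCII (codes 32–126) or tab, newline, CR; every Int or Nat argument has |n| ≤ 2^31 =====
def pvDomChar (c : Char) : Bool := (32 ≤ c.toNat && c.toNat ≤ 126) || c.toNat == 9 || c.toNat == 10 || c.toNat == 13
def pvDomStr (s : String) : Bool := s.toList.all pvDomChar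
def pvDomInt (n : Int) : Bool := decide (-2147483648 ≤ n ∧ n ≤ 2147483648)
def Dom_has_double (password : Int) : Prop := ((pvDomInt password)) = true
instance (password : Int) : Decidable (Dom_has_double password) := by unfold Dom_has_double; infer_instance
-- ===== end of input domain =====

-- B replaces A's prev/group_count/flag state machine with a stateless sliding-window
-- test over None-padded windows of four consecutive characters (alternative decomposition, same O(n) cost).

-- ===== PORT A =====
-- A's for-loop over str(password), carrying (prev, group_count, has_at_least_one);
-- Python's initial prev = '' (never equal to a character) is ported as `none`.
def pvLoopA : List Char → Option Char → Nat → Bool → Bool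
  | [], _, gc, flag => if gc == 2 then true else flag
  | c :: cs, prev, gc, flag =>
    if some c == prev then pvLoopA cs prev (gc + 1) flag
    else pvLoopA cs (some c) 1 (if gc == 2 then true else flag)

def has_double (password : Int) : Bool :=
  pvLoopA (PySem.Int.toStr password).toList none 1 false

-- ===== PORT B =====
-- Source B's any(...) over zip(padded, padded[1:], padded[2:], padded[3:]):
-- the zip of the four shifted lists enumerates exactly the consecutive 4-windows.
def pvQuadAny : List (Option Char) → Bool
  | a :: b :: c :: d :: rest => ((b == c) && (a != b) && (c != d)) || pvQuadAny (b :: c :: d :: rest)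
  | _ => false

def has_double_alt (password : Int) : Bool :=
  pvQuadAny (none :: (PySem.Int.toStr password).toList.map some ++ [none])

-- ===== PRECONDITION & SPEC =====
def Spec_has_double (password : Int) (out : Bool) : Prop := out = has_double_alt password
instance (password : Int) (out : Bool) : Decidable (Spec_has_double password out) := by unfold Spec_has_double; infer_instance

-- ===== CLAIM (what is proved, stated in full; the proofs are below) =====
def Claim_equal_has_double : Prop := ∀ (password : Int), Dom_has_double password → Spec_has_double password (has_double password)

-- ===== LEMMAS AND PROOFS =====

-- spec of A's loop: pvRun c n cs = "some maximal run of length exactly 2", given the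
-- current run is of character c, seen n times so far
def pvRun (c : Char) (n : Nat) : List Char → Bool
  | [] => n == 2
  | d :: ds => if d == c then pvRun c (n + 1) ds else (n == 2) || pvRun d 1 ds

theorem loopA_eq_run (cs : List Char) : ∀ (c : Char) (n : Nat) (flag : Bool),
    pvLoopA cs (some c) n flag = (flag || pvRun c n cs) := by
  induction cs with
  | nil =>
    intro c n flag
    cases flag <;> cases hn : (n == 2) <;> simp [pvLoopA, pvRun, hn]
  | cons d ds ih =>
    intro c n flag
    by_cases hdc : d = c
    · subst hdc
      simp [pvLoopA, pvRun, ih]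
    · have h2 : (d == c) = false := by simp [hdc]
      rw [show pvLoopA (d :: ds) (some c) n flag
            = pvLoopA ds (some d) 1 (if n == 2 then true else flag) from by
          simp [pvLoopA, hdc]]
      rw [ih, show pvRun c n (d :: ds) = ((n == 2) || pvRun d 1 ds) from by simp [pvRun, h2]]
      cases flag <;> cases hn : (n == 2) <;> simp [hn]

-- once a run has length ≥ 3 the count no longer matters
theorem run_ge3 (cs : List Char) : ∀ (c : Char) (n m : Nat), 3 ≤ n → 3 ≤ m →
    pvRun c n cs = pvRun c m cs := by
  induction cs with
  | nil => intro c n m hn hm; simp [pvRun]; omega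
  | cons d ds ih =>
    intro c n m hn hm
    by_cases hdc : (d == c) = true
    · simp only [pvRun, hdc, if_pos]
      exact ih c (n + 1) (m + 1) (by omega) (by omega)
    · simp only [pvRun, hdc, Bool.false_eq_true, if_neg, not_false_iff]
      have h1 : (n == 2) = false := by simp; omega
      have h2 : (m == 2) = false := by simp; omega
      rw [h1, h2]

-- one unfolding of pvQuadAny on a list with at least four elements
theorem quad_step (a b c e : Option Char) (l : List (Option Char)) :
    pvQuadAny (a :: b :: c :: e :: l)
      = (((b == c) && (a != b) && (c != e)) || pvQuadAny (b :: c :: e :: l)) := by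
  simp [pvQuadAny]

-- combined window/run lemma, by strong induction on the list length:
-- (Q) a window scan starting after a non-matching predecessor equals a fresh run, and
-- (S) a window scan whose run already holds ≥ 2 copies of c equals a run of length ≥ 3.
theorem quad_run (k : Nat) : ∀ (cs : List Char), cs.length ≤ k →
    (∀ (c : Char) (p : Option Char), p ≠ some c →
      pvQuadAny (p :: some c :: cs.map some ++ [none]) = pvRun c 1 cs)
    ∧ (∀ (c : Char),
      pvQuadAny (some c :: some c :: cs.map some ++ [none]) = pvRun c 3 cs) := by
  induction k with
  | zero =>
    intro cs hlen
    have : cs = [] := List.eq_nil_of_length_eq_zero (by omega)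
    subst this
    exact ⟨fun c p _ => by simp [pvQuadAny, pvRun], fun c => by simp [pvQuadAny, pvRun]⟩
  | succ k ih =>
    intro cs hlen
    cases cs with
    | nil =>
      exact ⟨fun c p _ => by simp [pvQuadAny, pvRun], fun c => by simp [pvQuadAny, pvRun]⟩
    | cons d ds =>
      have hds : ds.length ≤ k := by simpa using hlen
      constructor
      · -- (Q)
        intro c p hp
        have hpb : (p != some c) = true := by simp [hp]
        cases ds with
        | nil =>
          rw [show (p :: some c :: ([d] : List Char).map some ++ [none])
                = p :: some c :: some d :: none :: ([] : List (Option Char)) from by simp,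
              quad_step]
          by_cases hdc : d = c
          · subst hdc
            simp [pvQuadAny, pvRun, hpb]
          · have h2 : (d == c) = false := by simp [hdc]
            have h2' : ((some c : Option Char) == some d) = false := by
              simp [Ne.symm hdc]
            simp [pvQuadAny, pvRun, h2, h2']
        | cons e ds' =>
          rw [show (p :: some c :: ((d :: e :: ds') : List Char).map some ++ [none])
                = p :: some c :: some d :: some e :: (ds'.map some ++ [none]) from by simp,
              quad_step]
          by_cases hdc : d = c
          · subst hdc
            by_cases hec : e = d
            · subst hec
              have hS := (ih (e :: ds') (by simpa using hds)).2 e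
              rw [show (some e :: some e :: some e :: (ds'.map some ++ [none]))
                    = some e :: some e :: ((e :: ds') : List Char).map some ++ [none] from by simp,
                  hS]
              have : ((some e : Option Char) != some e) = false := by simp
              rw [this]
              simp only [Bool.and_false, Bool.false_and, Bool.false_or]
              rw [show pvRun e 1 (e :: e :: ds') = pvRun e 3 ds' from by simp [pvRun],
                  show pvRun e 3 (e :: ds') = pvRun e 4 ds' from by simp [pvRun]]
              exact (run_ge3 ds' e 4 3 (by omega) (by omega))
            · have he2 : ((some d : Option Char) != some e) = true := by
                simp [Ne.symm hec]
              rw [show ((some d : Option Char) == some d) = true from by simp, hpb, he2]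
              simp only [Bool.and_true, Bool.true_and, Bool.true_or]
              have he3 : (e == d) = false := by simp [hec]
              simp [pvRun, he3]
          · have h2 : (d == c) = false := by simp [hdc]
            have h2' : ((some c : Option Char) == some d) = false := by
              simp [Ne.symm hdc]
            rw [h2', Bool.false_and, Bool.false_and, Bool.false_or]
            have hQ := (ih (e :: ds') (by simpa using hds)).1 d (some c)
              (by intro h; exact hdc (Option.some.inj h).symm)
            rw [show (some c :: some d :: some e :: (ds'.map some ++ [none]))
                  = some c :: some d :: ((e :: ds') : List Char).map some ++ [none] from by simp,
                hQ]
            simp [pvRun, h2]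
      · -- (S)
        intro c
        cases ds with
        | nil =>
          rw [show ((some c :: some c :: ([d] : List Char).map some ++ [none]) : List (Option Char))
                = some c :: some c :: some d :: none :: ([] : List (Option Char)) from by simp,
              quad_step]
          rw [show ((some c : Option Char) != some c) = false from by simp]
          simp only [Bool.and_false, Bool.false_and, Bool.and_true, Bool.false_or]
          by_cases hdc : d = c
          · subst hdc; simp [pvQuadAny, pvRun]
          · have h2 : (d == c) = false := by simp [hdc]
            have h2' : ((some c : Option Char) == some d) = false := by
              simp [Ne.symm hdc]
            simp [pvQuadAny, pvRun, h2, h2']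
        | cons e ds' =>
          rw [show (some c :: some c :: ((d :: e :: ds') : List Char).map some ++ [none])
                = some c :: some c :: some d :: some e :: (ds'.map some ++ [none]) from by simp,
              quad_step]
          rw [show ((some c : Option Char) != some c) = false from by simp]
          simp only [Bool.and_false, Bool.false_and, Bool.false_or]
          by_cases hdc : d = c
          · subst hdc
            have hS := (ih (e :: ds') (by simpa using hds)).2 d
            rw [show (some d :: some d :: some e :: (ds'.map some ++ [none]))
                  = some d :: some d :: ((e :: ds') : List Char).map some ++ [none] from by simp,
                hS]
            rw [show pvRun d 3 (d :: e :: ds') = pvRun d 4 (e :: ds') from by simp [pvRun],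
                run_ge3 (e :: ds') d 4 3 (by omega) (by omega)]
          · have h2 : (d == c) = false := by simp [hdc]
            have hQ := (ih (e :: ds') (by simpa using hds)).1 d (some c)
              (by intro h; exact hdc (Option.some.inj h).symm)
            rw [show (some c :: some d :: some e :: (ds'.map some ++ [none]))
                  = some c :: some d :: ((e :: ds') : List Char).map some ++ [none] from by simp,
                hQ]
            simp [pvRun, h2]

theorem main_eq (l : List Char) :
    pvLoopA l none 1 false = pvQuadAny (none :: l.map some ++ [none]) := by
  cases l with
  | nil => simp [pvLoopA, pvQuadAny]
  | cons c cs =>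
    have hQ := (quad_run cs.length cs (le_refl _)).1 c none (by simp)
    rw [show ((none :: ((c :: cs) : List Char).map some ++ [none]) : List (Option Char))
          = none :: some c :: cs.map some ++ [none] from by simp,
        hQ]
    rw [show pvLoopA (c :: cs) none 1 false = pvLoopA cs (some c) 1 false from by
        simp [pvLoopA]]
    simpa using loopA_eq_run cs c 1 false

-- ===== VERDICT (by name: the statement is the Claim_ definition above) =====
theorem has_double_spec : Claim_equal_has_double := by
  intro password _
  unfold Spec_has_double has_double has_double_alt
  exact main_eq _
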